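-- pv_equiv track=rewrite | github.com/coolkp/moloco | q1.py | equalsWhenOneCharRemoved
-- ===== SOURCE A (Python) =====
-- def equalsWhenOneCharRemoved(x, y):
--     if abs(len(x) -len(y)) != 1:
--         return False
--     i = 0
--     j = 0
--     skip = 0
--     while(i<len(x) and j < len(y)):
--         if x[i] != y[j]:
--             skip += 1
--             if(skip > 1):
--                 return False
--             if len(x) > len(y):
--                 i += 1
--             else:
--                 j += 1
--         else:
--             i +=1
--             j += 1
--     return True
-- ===== SOURCE B (Python) =====
-- def equalsWhenOneCharRemoved(x, y):
--     if abs(len(x) - len(y)) != 1: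
--         return False
--     if len(x) < len(y):
--         x, y = y, x
--     for i in range(len(y)):
--         if x[i] != y[i]:
--             return x[i+1:] == y[i:]
--     return True
-- ===== Notes on version B (the rewrite author's own statement) =====
-- stated objective: simpler
-- what changed: Replaces the fused two-pointer loop with a skip counter by: orient so the longer string comes first, scan the common prefix, and at the first mismatch decide with a single suffix comparison x[i+1:] == y[i:].
import Mathlib
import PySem

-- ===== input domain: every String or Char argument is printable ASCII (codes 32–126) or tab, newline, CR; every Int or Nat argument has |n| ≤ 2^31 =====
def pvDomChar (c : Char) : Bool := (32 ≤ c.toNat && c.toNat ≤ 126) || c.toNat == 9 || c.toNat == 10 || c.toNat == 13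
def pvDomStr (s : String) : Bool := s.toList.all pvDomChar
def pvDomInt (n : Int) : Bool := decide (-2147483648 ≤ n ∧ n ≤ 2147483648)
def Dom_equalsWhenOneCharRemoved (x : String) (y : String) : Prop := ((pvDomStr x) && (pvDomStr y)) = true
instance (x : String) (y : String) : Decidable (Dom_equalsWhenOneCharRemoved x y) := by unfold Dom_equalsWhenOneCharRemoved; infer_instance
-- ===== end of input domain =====

-- B simplifies A's fused skip-counter two-pointer loop into: orient longer-first, scan the
-- common prefix, and decide the first mismatch by one suffix comparison ("simpler").

-- ===== PORT A =====
-- the while loop of A: state (i, j, skip), indexing into the full lists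
def pvALoop (xs ys : List Char) (i j skip : Nat) : Bool :=
  if _h : i < xs.length ∧ j < ys.length then
    if xs.getD i ' ' ≠ ys.getD j ' ' then
      if skip + 1 > 1 then false
      else if xs.length > ys.length then pvALoop xs ys (i+1) j (skip+1)
      else pvALoop xs ys i (j+1) (skip+1)
    else pvALoop xs ys (i+1) (j+1) skip
  else true
termination_by xs.length + ys.length - (i + j)
decreasing_by all_goals omega

def equalsWhenOneCharRemoved (x : String) (y : String) : Bool :=
  if ((x.toList.length : Int) - (y.toList.length : Int)).natAbs ≠ 1 then false
  else pvALoop x.toList y.toList 0 0 0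

-- ===== PORT B =====
-- B's prefix scan: first argument is the longer string's (remaining) characters;
-- at the first mismatch return x[i+1:] == y[i:], i.e. the tail vs the whole remaining shorter side
def pvBScan (xs ys : List Char) : Bool :=
  match xs, ys with
  | _, [] => true
  | [], _ :: _ => true
  | a :: xs', b :: ys' => if a ≠ b then xs' == b :: ys' else pvBScan xs' ys'

def equalsWhenOneCharRemoved_alt (x : String) (y : String) : Bool :=
  if ((x.toList.length : Int) - (y.toList.length : Int)).natAbs ≠ 1 then false
  else if x.toList.length < y.toList.length then pvBScan y.toList x.toList
  else pvBScan x.toList y.toList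

-- ===== PRECONDITION & SPEC =====
def Spec_equalsWhenOneCharRemoved (x : String) (y : String) (out : Bool) : Prop := out = equalsWhenOneCharRemoved_alt x y
instance (x : String) (y : String) (out : Bool) : Decidable (Spec_equalsWhenOneCharRemoved x y out) := by unfold Spec_equalsWhenOneCharRemoved; infer_instance

-- ===== CLAIM (what is proved, stated in full; the proofs are below) =====
def Claim_equal_equalsWhenOneCharRemoved : Prop := ∀ (x : String) (y : String), Dom_equalsWhenOneCharRemoved x y → Spec_equalsWhenOneCharRemoved x y (equalsWhenOneCharRemoved x y)

-- ===== LEMMAS AND PROOFS =====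

theorem pvBScan_cons (a b : Char) (xs ys : List Char) :
    pvBScan (a :: xs) (b :: ys) = if a ≠ b then xs == b :: ys else pvBScan xs ys := rfl

-- skip phase, x longer: pure elementwise equality of the remaining suffixes
theorem pvA1 (xs ys : List Char) (j : Nat) (hl : xs.length = ys.length + 1) (hj : j ≤ ys.length) :
    pvALoop xs ys (j+1) j 1 = decide (xs.drop (j+1) = ys.drop j) := by
  rw [pvALoop]
  by_cases hlt : j < ys.length
  · have hx : j + 1 < xs.length := by omega
    have hdx : xs.drop (j+1) = xs[j+1] :: xs.drop (j+2) := List.drop_eq_getElem_cons hx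
    have hdy : ys.drop j = ys[j] :: ys.drop (j+1) := List.drop_eq_getElem_cons hlt
    have hgx : xs.getD (j+1) ' ' = xs[j+1] := List.getD_eq_getElem _ _ hx
    have hgy : ys.getD j ' ' = ys[j] := List.getD_eq_getElem _ _ hlt
    simp only [hx, hlt, and_true, dif_pos, hgx, hgy]
    by_cases hne : xs[j+1] = ys[j]
    · simp only [hne, ne_eq, not_true_eq_false, if_false]
      rw [pvA1 xs ys (j+1) hl (by omega)]
      refine (decide_eq_decide.mpr ?_).symm
      rw [hdx, hne, hdy]
      exact ⟨fun h => by injection h, fun h => by rw [h]⟩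
    · simp only [if_pos (by simpa using hne)]
      have hneq : ¬ (xs.drop (j+1) = ys.drop j) := by
        rw [hdx, hdy]; intro h; injection h with h1 _; exact hne h1
      simp [hneq]
  · have hcond : ¬ (j + 1 < xs.length ∧ j < ys.length) := by omega
    rw [dif_neg hcond]
    have h1 : xs.drop (j+1) = ([] : List Char) := List.drop_eq_nil_of_le (by omega)
    have h2 : ys.drop j = ([] : List Char) := List.drop_eq_nil_of_le (by omega)
    simp [h1, h2]
termination_by ys.length - j
decreasing_by omega

-- skip phase, y longer
theorem pvA1' (xs ys : List Char) (j : Nat) (hl : ys.length = xs.length + 1) (hj : j ≤ xs.length) :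
    pvALoop xs ys j (j+1) 1 = decide (xs.drop j = ys.drop (j+1)) := by
  rw [pvALoop]
  by_cases hlt : j < xs.length
  · have hy : j + 1 < ys.length := by omega
    have hdx : xs.drop j = xs[j] :: xs.drop (j+1) := List.drop_eq_getElem_cons hlt
    have hdy : ys.drop (j+1) = ys[j+1] :: ys.drop (j+2) := List.drop_eq_getElem_cons hy
    have hgx : xs.getD j ' ' = xs[j] := List.getD_eq_getElem _ _ hlt
    have hgy : ys.getD (j+1) ' ' = ys[j+1] := List.getD_eq_getElem _ _ hy
    simp only [hlt, hy, true_and, dif_pos, hgx, hgy]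
    by_cases hne : xs[j] = ys[j+1]
    · simp only [hne, ne_eq, not_true_eq_false, if_false]
      rw [pvA1' xs ys (j+1) hl (by omega)]
      refine (decide_eq_decide.mpr ?_).symm
      rw [hdx, hne, hdy]
      exact ⟨fun h => by injection h, fun h => by rw [h]⟩
    · have hng : ¬ xs.length > ys.length := by omega
      simp only [if_pos (by simpa using hne), if_neg hng]
      have hneq : ¬ (xs.drop j = ys.drop (j+1)) := by
        rw [hdx, hdy]; intro h; injection h with h1 _; exact hne h1
      simp [hneq]
  · have hcond : ¬ (j < xs.length ∧ j + 1 < ys.length) := by omega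
    rw [dif_neg hcond]
    have h1 : xs.drop j = ([] : List Char) := List.drop_eq_nil_of_le (by omega)
    have h2 : ys.drop (j+1) = ([] : List Char) := List.drop_eq_nil_of_le (by omega)
    simp [h1, h2]
termination_by xs.length - j
decreasing_by omega

-- no-skip phase, x longer: A's loop from (j, j, 0) equals B's scan of the dropped suffixes
theorem pvA0 (xs ys : List Char) (j : Nat) (hl : xs.length = ys.length + 1) (hj : j ≤ ys.length) :
    pvALoop xs ys j j 0 = pvBScan (xs.drop j) (ys.drop j) := by
  rw [pvALoop]
  by_cases hlt : j < ys.length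
  · have hx : j < xs.length := by omega
    have hdx : xs.drop j = xs[j] :: xs.drop (j+1) := List.drop_eq_getElem_cons hx
    have hdy : ys.drop j = ys[j] :: ys.drop (j+1) := List.drop_eq_getElem_cons hlt
    have hgx : xs.getD j ' ' = xs[j] := List.getD_eq_getElem _ _ hx
    have hgy : ys.getD j ' ' = ys[j] := List.getD_eq_getElem _ _ hlt
    simp only [hx, hlt, and_true, dif_pos, hgx, hgy]
    by_cases hne : xs[j] = ys[j]
    · simp only [hne, ne_eq, not_true_eq_false, if_false]
      rw [pvA0 xs ys (j+1) hl (by omega)]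
      conv_rhs => rw [hdx, hdy, pvBScan_cons]
      rw [if_neg (by simp [hne])]
    · have hg : xs.length > ys.length := by omega
      simp only [if_pos (by simpa using hne), if_pos hg]
      rw [pvA1 xs ys j hl (by omega)]
      conv_rhs => rw [hdx, hdy, pvBScan_cons]
      rw [if_pos hne, ← hdy]
      by_cases h2 : xs.drop (j+1) = ys.drop j <;> simp [h2]
  · have hcond : ¬ (j < xs.length ∧ j < ys.length) := by omega
    rw [dif_neg hcond]
    have h2 : ys.drop j = ([] : List Char) := List.drop_eq_nil_of_le (by omega)
    rw [h2]
    cases xs.drop j <;> simp [pvBScan]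
termination_by ys.length - j
decreasing_by omega

-- no-skip phase, y longer: B scans with the longer string (y) first
theorem pvA0' (xs ys : List Char) (j : Nat) (hl : ys.length = xs.length + 1) (hj : j ≤ xs.length) :
    pvALoop xs ys j j 0 = pvBScan (ys.drop j) (xs.drop j) := by
  rw [pvALoop]
  by_cases hlt : j < xs.length
  · have hy : j < ys.length := by omega
    have hdx : xs.drop j = xs[j] :: xs.drop (j+1) := List.drop_eq_getElem_cons hlt
    have hdy : ys.drop j = ys[j] :: ys.drop (j+1) := List.drop_eq_getElem_cons hy
    have hgx : xs.getD j ' ' = xs[j] := List.getD_eq_getElem _ _ hlt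
    have hgy : ys.getD j ' ' = ys[j] := List.getD_eq_getElem _ _ hy
    simp only [hlt, hy, true_and, dif_pos, hgx, hgy]
    by_cases hne : xs[j] = ys[j]
    · simp only [hne, ne_eq, not_true_eq_false, if_false]
      rw [pvA0' xs ys (j+1) hl (by omega)]
      conv_rhs => rw [hdx, hdy, pvBScan_cons]
      rw [if_neg (by simp [hne])]
    · have hng : ¬ xs.length > ys.length := by omega
      have hne' : ¬ ys[j] = xs[j] := fun h => hne h.symm
      simp only [if_pos (by simpa using hne), if_neg hng]
      rw [pvA1' xs ys j hl (by omega)]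
      conv_rhs => rw [hdx, hdy, pvBScan_cons]
      rw [if_pos hne', ← hdx]
      by_cases h2 : xs.drop j = ys.drop (j+1)
      · simp [h2]
      · have h2' : ¬ ys.drop (j+1) = xs.drop j := fun h => h2 h.symm
        simp [h2, h2']
  · have hcond : ¬ (j < xs.length ∧ j < ys.length) := by omega
    rw [dif_neg hcond]
    have h1 : xs.drop j = ([] : List Char) := List.drop_eq_nil_of_le (by omega)
    rw [h1]
    cases ys.drop j <;> simp [pvBScan]
termination_by xs.length - j
decreasing_by omega

-- ===== VERDICT (by name: the statement is the Claim_ definition above) =====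
theorem equalsWhenOneCharRemoved_spec : Claim_equal_equalsWhenOneCharRemoved := by
  intro x y _
  unfold Spec_equalsWhenOneCharRemoved equalsWhenOneCharRemoved equalsWhenOneCharRemoved_alt
  by_cases hg : ((x.toList.length : Int) - (y.toList.length : Int)).natAbs ≠ 1
  · rw [if_pos hg, if_pos hg]
  · rw [if_neg hg, if_neg hg]
    have h1 : x.toList.length = y.toList.length + 1 ∨ y.toList.length = x.toList.length + 1 := by
      omega
    rcases h1 with h | h
    · rw [if_neg (by omega)]
      simpa using pvA0 x.toList y.toList 0 h (by omega)
    · rw [if_pos (by omega)]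
      simpa using pvA0' x.toList y.toList 0 h (by omega)
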